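-- pv_equiv track=rewrite | github.com/weber-jeff/orical-backend | utils.py | calculate_challenge_numbers
-- ===== SOURCE A (Python) =====
-- def reduce_number(n: int, keep_master_as_is=True) -> int:
--     if keep_master_as_is and n in [11, 22, 33]: return n
--     s = str(n)
--     while len(s) > 1:
--         current_sum = sum(int(digit) for digit in s)
--         if keep_master_as_is and current_sum in [11, 22, 33] and len(str(current_sum)) == 2:
--             return current_sum
--         s = str(current_sum)
--         if len(s) == 1: break
--     return int(s)
--
-- def get_reduced_date_components(birth_date_str: str) -> tuple[int|str, int|str, int|str] | str:
--     try:
--         parts = birth_date_str.split('-')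
--         if len(parts) != 3: raise ValueError("Date must be YYYY-MM-DD")
--         year, month, day = int(parts[0]), int(parts[1]), int(parts[2])
--         r_month = reduce_number(month, keep_master_as_is=True)
--         r_day = reduce_number(day, keep_master_as_is=True)
--         year_sum_digits = sum(int(d) for d in str(year))
--         r_year = reduce_number(year_sum_digits, keep_master_as_is=True)
--         return r_month, r_day, r_year
--     except ValueError as ve: return f"Invalid date component: {ve}"
--     except Exception as e: return f"Error reducing date components: {e}"
--
-- def calculate_challenge_numbers(birth_date_str: str) -> list[int | str] | str:
--     components = get_reduced_date_components(birth_date_str)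
--     if isinstance(components, str): return f"Cannot calculate Challenges: {components}"
--     r_month, r_day, r_year = components
--     sd_month = reduce_number(r_month, keep_master_as_is=False)
--     sd_day = reduce_number(r_day, keep_master_as_is=False)
--     sd_year = reduce_number(r_year, keep_master_as_is=False)
--     if not all(isinstance(i, int) for i in [sd_month, sd_day, sd_year]):
--          return "Invalid date components for Challenges after reduction."
--     try:
--         challenge1 = reduce_number(abs(sd_month - sd_day), keep_master_as_is=False)
--         challenge2 = reduce_number(abs(sd_day - sd_year), keep_master_as_is=False)
--         main_challenge3 = reduce_number(abs(challenge1 - challenge2), keep_master_as_is=False)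
--         challenge4 = reduce_number(abs(sd_month - sd_year), keep_master_as_is=False)
--         return [challenge1, challenge2, main_challenge3, challenge4]
--     except Exception as e: return f"Error calculating Challenges: {e}"
-- ===== SOURCE B (Python) =====
-- def digit_sum(n):
--     t = 0
--     while n:
--         n, d = divmod(n, 10)
--         t += d
--     return t
--
--
-- def reduce_master(n):
--     while n > 9 and n not in (11, 22, 33):
--         n = digit_sum(n)
--     return n
--
--
-- def digital_root(n):
--     return 0 if n == 0 else 1 + (n - 1) % 9
--
--
-- def calculate_challenge_numbers(birth_date_str: str):
--     try:
--         parts = birth_date_str.split('-')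
--         if len(parts) != 3:
--             raise ValueError("Date must be YYYY-MM-DD")
--         year, month, day = (int(p) for p in parts)
--     except ValueError as ve:
--         return f"Cannot calculate Challenges: Invalid date component: {ve}"
--     sd_month = digital_root(reduce_master(month))
--     sd_day = digital_root(reduce_master(day))
--     sd_year = digital_root(reduce_master(digit_sum(year)))
--     challenge1 = digital_root(abs(sd_month - sd_day))
--     challenge2 = digital_root(abs(sd_day - sd_year))
--     challenge3 = digital_root(abs(challenge1 - challenge2))
--     challenge4 = digital_root(abs(sd_month - sd_year))
--     return [challenge1, challenge2, challenge3, challenge4]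
-- ===== Notes on version B (the rewrite author's own statement) =====
-- stated objective: simpler
-- what changed: B replaces A's three-helper pipeline of str()/int() round-trip digit-summing loops with one function: a single try/except around the parse, divmod digit sums, a while-until-master reduction, and the closed-form digital root 1+(n-1)%9 for every single-digit reduction and the four challenges.
import Mathlib
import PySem

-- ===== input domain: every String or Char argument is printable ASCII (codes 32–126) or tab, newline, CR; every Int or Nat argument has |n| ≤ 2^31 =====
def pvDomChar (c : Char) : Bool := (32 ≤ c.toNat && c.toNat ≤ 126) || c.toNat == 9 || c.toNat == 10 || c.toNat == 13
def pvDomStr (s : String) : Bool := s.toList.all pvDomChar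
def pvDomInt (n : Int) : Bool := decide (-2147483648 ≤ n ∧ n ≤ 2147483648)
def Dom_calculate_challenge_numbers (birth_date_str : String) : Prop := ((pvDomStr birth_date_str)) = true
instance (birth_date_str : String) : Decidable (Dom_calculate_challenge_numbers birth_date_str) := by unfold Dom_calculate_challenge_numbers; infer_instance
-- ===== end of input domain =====

-- B parses with one try/except and computes the numerology via divmod digit sums, a while-until-master
-- reduction and the closed-form digital root 1+(n-1)%9, instead of A's three helpers that repeatedly
-- digit-sum through str()/int() round-trips. On a valid date the Python functions return list[int];
-- the required Lean result type is String, so both ports return that list rendered as Python's str()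
-- of it (same shared rendering helper on both sides); on parse errors both return A's exact strings.

-- Shared semantic primitives (like PySem): exact models of CPython behaviour on the ASCII domain.
-- repr(s) for a str of printable-ASCII/tab/newline/CR chars (the int() ValueError message text)
def pyReprChars (cs : List Char) : List Char :=
  let q : Char := if cs.contains '\'' && !(cs.contains '"') then '"' else '\''
  [q] ++ cs.flatMap (fun c =>
      if c = '\\' then ['\\', '\\']
      else if c = q then ['\\', q]
      else if c = '\t' then ['\\', 't']
      else if c = '\n' then ['\\', 'n']
      else if c = '\r' then ['\\', 'r']
      else [c]) ++ [q]

-- str(list-of-ints): "[a, b, …]"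
def pvRenderIntList (xs : List Int) : String :=
  String.ofList ('[' :: PySem.Chars.join ", ".toList (xs.map PySem.Int.toChars) ++ [']'])

-- ===== PORT A =====
-- int(digit) for a single char; exact on '0'..'9', the only chars reachable (digits of str(n), n ≥ 0)
def pvIntOfDigitChar (c : Char) : Int := ((c.toNat : Int) - 48)

-- sum(int(digit) for digit in s)
def pvDigitSumChars (s : List Char) : Int := (s.map pvIntOfDigitChar).sum

-- A's while-loop in reduce_number; the loop variable s is str of the running value, carried here as
-- that value n (s = PySem.Int.toChars n at every use). fuel only makes the recursion total: n.toNat+1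
-- always suffices since the digit sum strictly shrinks a value with more than one digit.
def pvReduceLoopA : Nat → Bool → Int → Int
  | 0, _, n => n
  | fuel + 1, keep, n =>
    if 1 < (PySem.Int.toChars n).length then
      let currentSum := pvDigitSumChars (PySem.Int.toChars n)
      if keep && (currentSum == 11 || currentSum == 22 || currentSum == 33)
          && ((PySem.Int.toChars currentSum).length == 2) then
        currentSum
      else
        pvReduceLoopA fuel keep currentSum
    else n

def pvReduceNumberA (n : Int) (keep : Bool) : Int :=
  if keep && (n == 11 || n == 22 || n == 33) then n
  else pvReduceLoopA (n.toNat + 1) keep n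

-- get_reduced_date_components: .inl = the tuple, .inr = the error string it returns
def pvGetReducedA (birth_date_str : String) : Sum (Int × Int × Int) (List Char) :=
  let parts := PySem.Chars.splitOn birth_date_str.toList ['-']
  if parts.length ≠ 3 then Sum.inr ("Invalid date component: ".toList ++ "Date must be YYYY-MM-DD".toList)
  else
    match PySem.Int.ofChars? (parts.getD 0 []) with
    | none => Sum.inr ("Invalid date component: ".toList
        ++ ("invalid literal for int() with base 10: ".toList ++ pyReprChars (parts.getD 0 [])))
    | some year =>
      match PySem.Int.ofChars? (parts.getD 1 []) with
      | none => Sum.inr ("Invalid date component: ".toList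
          ++ ("invalid literal for int() with base 10: ".toList ++ pyReprChars (parts.getD 1 [])))
      | some month =>
        match PySem.Int.ofChars? (parts.getD 2 []) with
        | none => Sum.inr ("Invalid date component: ".toList
            ++ ("invalid literal for int() with base 10: ".toList ++ pyReprChars (parts.getD 2 [])))
        | some day =>
          let r_month := pvReduceNumberA month true
          let r_day := pvReduceNumberA day true
          let year_sum_digits := pvDigitSumChars (PySem.Int.toChars year)
          let r_year := pvReduceNumberA year_sum_digits true
          Sum.inl (r_month, r_day, r_year)

def calculate_challenge_numbers (birth_date_str : String) : String :=
  match pvGetReducedA birth_date_str with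
  | Sum.inr msg => String.ofList ("Cannot calculate Challenges: ".toList ++ msg)
  | Sum.inl (r_month, r_day, r_year) =>
    let sd_month := pvReduceNumberA r_month false
    let sd_day := pvReduceNumberA r_day false
    let sd_year := pvReduceNumberA r_year false
    -- the all-isinstance-int guard is vacuous here: every component is an Int
    let challenge1 := pvReduceNumberA |sd_month - sd_day| false
    let challenge2 := pvReduceNumberA |sd_day - sd_year| false
    let main_challenge3 := pvReduceNumberA |challenge1 - challenge2| false
    let challenge4 := pvReduceNumberA |sd_month - sd_year| false
    pvRenderIntList [challenge1, challenge2, main_challenge3, challenge4]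

-- ===== PORT B =====
-- digit_sum: the divmod loop (Source B only calls it on non-negative ints; exact there)
def pvDSumNat (n : Nat) : Nat :=
  if h : n = 0 then 0 else n % 10 + pvDSumNat (n / 10)
decreasing_by exact Nat.div_lt_self (Nat.pos_of_ne_zero h) (by omega)

def pvDSum (n : Int) : Int := (pvDSumNat n.toNat : Int)

-- reduce_master's while-loop; fuel n+1 suffices since the digit sum strictly shrinks a value > 9
def pvReduceMasterLoop : Nat → Nat → Nat
  | 0, n => n
  | fuel + 1, n =>
    if 9 < n ∧ n ≠ 11 ∧ n ≠ 22 ∧ n ≠ 33 then pvReduceMasterLoop fuel (pvDSumNat n) else n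

def pvReduceMaster (n : Int) : Int := (pvReduceMasterLoop (n.toNat + 1) n.toNat : Int)

-- digital_root: closed form
def pvDr (n : Int) : Int := if n = 0 then 0 else 1 + PySem.Int.mod (n - 1) 9

def calculate_challenge_numbers_alt (birth_date_str : String) : String :=
  let parts := PySem.Chars.splitOn birth_date_str.toList ['-']
  if parts.length ≠ 3 then
    -- the raised ValueError("Date must be YYYY-MM-DD") caught and formatted
    String.ofList ("Cannot calculate Challenges: Invalid date component: ".toList
      ++ "Date must be YYYY-MM-DD".toList)
  else
    -- the generator unpacking: int() on each part in order; the first failure's ValueError is caught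
    match PySem.Int.ofChars? (parts.getD 0 []) with
    | none => String.ofList ("Cannot calculate Challenges: Invalid date component: invalid literal for int() with base 10: ".toList ++ pyReprChars (parts.getD 0 []))
    | some year =>
      match PySem.Int.ofChars? (parts.getD 1 []) with
      | none => String.ofList ("Cannot calculate Challenges: Invalid date component: invalid literal for int() with base 10: ".toList ++ pyReprChars (parts.getD 1 []))
      | some month =>
        match PySem.Int.ofChars? (parts.getD 2 []) with
        | none => String.ofList ("Cannot calculate Challenges: Invalid date component: invalid literal for int() with base 10: ".toList ++ pyReprChars (parts.getD 2 []))
        | some day =>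
          let sd_month := pvDr (pvReduceMaster month)
          let sd_day := pvDr (pvReduceMaster day)
          let sd_year := pvDr (pvReduceMaster (pvDSum year))
          let challenge1 := pvDr |sd_month - sd_day|
          let challenge2 := pvDr |sd_day - sd_year|
          let challenge3 := pvDr |challenge1 - challenge2|
          let challenge4 := pvDr |sd_month - sd_year|
          pvRenderIntList [challenge1, challenge2, challenge3, challenge4]

-- ===== PRECONDITION & SPEC =====
def Spec_calculate_challenge_numbers (birth_date_str : String) (out : String) : Prop := out = calculate_challenge_numbers_alt birth_date_str
instance (birth_date_str : String) (out : String) : Decidable (Spec_calculate_challenge_numbers birth_date_str out) := by unfold Spec_calculate_challenge_numbers; infer_instance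

-- ===== CLAIM (what is proved, stated in full; the proofs are below) =====
def Claim_equal_calculate_challenge_numbers : Prop := ∀ (birth_date_str : String), Dom_calculate_challenge_numbers birth_date_str → Spec_calculate_challenge_numbers birth_date_str (calculate_challenge_numbers birth_date_str)

-- ===== LEMMAS AND PROOFS =====

-- str(n) for a Nat, structurally: most-significant digit first
def pvDigitsAux (n : Nat) : List Char :=
  if h : n < 10 then [Nat.digitChar n]
  else pvDigitsAux (n / 10) ++ [Nat.digitChar (n % 10)]
decreasing_by exact Nat.div_lt_self (by omega) (by omega)

theorem pv_dsum_small (m : Nat) (h : m < 10) : pvDSumNat m = m := by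
  rw [pvDSumNat]
  by_cases h0 : m = 0
  · simp [h0]
  · rw [dif_neg h0]
    have h10 : m / 10 = 0 := by omega
    rw [h10]
    rw [pvDSumNat]
    simp
    omega

theorem pv_toDigitsCore_eq (f : Nat) : ∀ (n : Nat) (acc : List Char), n < 10 ^ (f + 1) →
    Nat.toDigitsCore 10 (f + 1) n acc = pvDigitsAux n ++ acc := by
  induction f with
  | zero =>
    intro n acc h
    have hn : n < 10 := by simpa using h
    rw [Nat.toDigitsCore]
    rw [if_pos (by omega)]
    rw [pvDigitsAux, dif_pos hn, Nat.mod_eq_of_lt hn]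
    simp
  | succ f ih =>
    intro n acc h
    rw [Nat.toDigitsCore]
    by_cases h10 : n / 10 = 0
    · rw [if_pos h10]
      have hn : n < 10 := by omega
      rw [pvDigitsAux, dif_pos hn, Nat.mod_eq_of_lt hn]
      simp
    · rw [if_neg h10]
      rw [ih (n / 10) _ (by
        rw [Nat.div_lt_iff_lt_mul (by omega)]
        calc n < 10 ^ (f + 1 + 1) := h
        _ = 10 ^ (f + 1) * 10 := by ring)]
      conv_rhs => rw [pvDigitsAux, dif_neg (show ¬ n < 10 by omega)]
      simp

theorem pv_toChars_natCast (m : Nat) : PySem.Int.toChars (m : Int) = pvDigitsAux m := by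
  unfold PySem.Int.toChars
  rw [if_neg (by omega)]
  simp only [Int.toNat_natCast]
  show Nat.toDigitsCore 10 (m + 1) m [] = _
  rw [pv_toDigitsCore_eq m m [] (by
    calc m < 10 ^ m := Nat.lt_pow_self (by omega)
    _ ≤ 10 ^ (m + 1) := Nat.pow_le_pow_right (by omega) (by omega))]
  simp

theorem pv_digitChar_val (d : Nat) (h : d < 10) : pvIntOfDigitChar (Nat.digitChar d) = (d : Int) := by
  interval_cases d <;> decide

theorem pv_digitsAux_sum (m : Nat) : pvDigitSumChars (pvDigitsAux m) = (pvDSumNat m : Int) := by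
  induction m using Nat.strong_induction_on with
  | _ m ih =>
    rw [pvDigitsAux]
    by_cases h : m < 10
    · rw [dif_pos h]
      simp [pvDigitSumChars, pv_digitChar_val m h, pv_dsum_small m h]
    · rw [dif_neg h]
      have hrec := ih (m / 10) (Nat.div_lt_self (by omega) (by omega))
      have : pvDigitSumChars (pvDigitsAux (m / 10) ++ [Nat.digitChar (m % 10)])
          = pvDigitSumChars (pvDigitsAux (m / 10)) + pvIntOfDigitChar (Nat.digitChar (m % 10)) := by
        simp [pvDigitSumChars]
      rw [this, hrec, pv_digitChar_val (m % 10) (by omega)]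
      conv_rhs => rw [pvDSumNat, dif_neg (show ¬ m = 0 by omega)]
      push_cast
      ring

theorem pv_digitSum_toChars (m : Nat) : pvDigitSumChars (PySem.Int.toChars (m : Int)) = (pvDSumNat m : Int) := by
  rw [pv_toChars_natCast]; exact pv_digitsAux_sum m

theorem pv_digitsAux_len (m : Nat) : 1 < (pvDigitsAux m).length ↔ 10 ≤ m := by
  rw [pvDigitsAux]
  by_cases h : m < 10
  · rw [dif_pos h]; simp; omega
  · rw [dif_neg h]
    have : 1 ≤ (pvDigitsAux (m / 10)).length := by
      rw [pvDigitsAux]; split <;> simp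
    simp; omega

theorem pv_dsum_le (m : Nat) : pvDSumNat m ≤ m := by
  induction m using Nat.strong_induction_on with
  | _ m ih =>
    rw [pvDSumNat]
    by_cases h : m = 0
    · simp [h]
    · rw [dif_neg h]
      have := ih (m / 10) (Nat.div_lt_self (by omega) (by omega))
      omega

theorem pv_dsum_lt (m : Nat) (h : 10 ≤ m) : pvDSumNat m < m := by
  rw [pvDSumNat, dif_neg (by omega)]
  have := pv_dsum_le (m / 10)
  omega

theorem pv_dsum_mod9 (m : Nat) : pvDSumNat m % 9 = m % 9 := by
  induction m using Nat.strong_induction_on with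
  | _ m ih =>
    rw [pvDSumNat]
    by_cases h : m = 0
    · simp [h]
    · rw [dif_neg h]
      have := ih (m / 10) (Nat.div_lt_self (by omega) (by omega))
      omega

theorem pv_dsum_pos (m : Nat) (h : 0 < m) : 0 < pvDSumNat m := by
  induction m using Nat.strong_induction_on with
  | _ m ih =>
    rw [pvDSumNat, dif_neg (by omega)]
    by_cases h10 : m < 10
    · have : m / 10 = 0 := by omega
      omega
    · have := ih (m / 10) (Nat.div_lt_self (by omega) (by omega)) (by omega)
      omega

-- the digital root on Nat
def pvDrNat (m : Nat) : Nat := if m = 0 then 0 else 1 + (m - 1) % 9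

theorem pv_dr_natCast (m : Nat) : pvDr (m : Int) = (pvDrNat m : Int) := by
  unfold pvDr pvDrNat
  by_cases h : m = 0
  · simp [h]
  · rw [if_neg (by exact_mod_cast h), if_neg h]
    have h1 : ((m : Int) - 1) = ((m - 1 : Nat) : Int) := by omega
    rw [h1, PySem.Int.mod_eq_emod_of_pos (by omega)]
    omega

theorem pv_drNat_small (m : Nat) (h : m < 10) : pvDrNat m = m := by
  unfold pvDrNat
  by_cases h0 : m = 0
  · simp [h0]
  · rw [if_neg h0]; omega

theorem pv_drNat_dsum (m : Nat) (h : 10 ≤ m) : pvDrNat (pvDSumNat m) = pvDrNat m := by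
  have h1 := pv_dsum_mod9 m
  have h2 := pv_dsum_pos m (by omega)
  unfold pvDrNat
  rw [if_neg (by omega), if_neg (by omega)]
  omega

theorem pv_len_toChars (m : Nat) : (1 < (PySem.Int.toChars (m : Int)).length) ↔ 10 ≤ m := by
  rw [pv_toChars_natCast]; exact pv_digitsAux_len m

theorem pv_loopA_false (m : Nat) : ∀ fuel, m < fuel → pvReduceLoopA fuel false (m : Int) = (pvDrNat m : Int) := by
  induction m using Nat.strong_induction_on with
  | _ m ih =>
    intro fuel hf
    cases fuel with
    | zero => omega
    | succ f =>
      rw [pvReduceLoopA]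
      by_cases h : 10 ≤ m
      · rw [if_pos ((pv_len_toChars m).mpr h), if_neg (by simp)]
        rw [pv_digitSum_toChars m]
        have hlt := pv_dsum_lt m h
        rw [ih (pvDSumNat m) hlt f (by omega)]
        rw [pv_drNat_dsum m h]
      · rw [if_neg (by rw [pv_len_toChars m]; omega)]
        rw [pv_drNat_small m (by omega)]

-- the master-aware reduction both versions compute
def pvM (m : Nat) : Nat :=
  if h : m < 10 ∨ m = 11 ∨ m = 22 ∨ m = 33 then m else pvM (pvDSumNat m)
decreasing_by exact pv_dsum_lt m (by omega)

theorem pv_M_master (m : Nat) (h : m = 11 ∨ m = 22 ∨ m = 33) : pvM m = m := by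
  rw [pvM, dif_pos (Or.inr h)]

theorem pv_loopA_true (m : Nat) : ∀ fuel, m < fuel → ¬(m = 11 ∨ m = 22 ∨ m = 33) →
    pvReduceLoopA fuel true (m : Int) = (pvM m : Int) := by
  induction m using Nat.strong_induction_on with
  | _ m ih =>
    intro fuel hf hm
    cases fuel with
    | zero => omega
    | succ f =>
      rw [pvReduceLoopA]
      by_cases h : 10 ≤ m
      · rw [if_pos ((pv_len_toChars m).mpr h)]
        rw [pv_digitSum_toChars m]
        have hlt := pv_dsum_lt m h
        by_cases hcs : pvDSumNat m = 11 ∨ pvDSumNat m = 22 ∨ pvDSumNat m = 33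
        · have hcond : (true && (((pvDSumNat m : Int) == 11) || ((pvDSumNat m : Int) == 22) || ((pvDSumNat m : Int) == 33))
              && ((PySem.Int.toChars ((pvDSumNat m : Nat) : Int)).length == 2)) = true := by
            rcases hcs with h11 | h22 | h33 <;> · rw [‹pvDSumNat m = _›]; decide
          rw [if_pos hcond]
          conv_rhs => rw [pvM, dif_neg (by omega)]
          rw [pv_M_master (pvDSumNat m) hcs]
        · have hX : (((pvDSumNat m : Int) == 11) || ((pvDSumNat m : Int) == 22) || ((pvDSumNat m : Int) == 33)) = false := by
            simp only [Bool.or_eq_false_iff, beq_eq_false_iff_ne, ne_eq]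
            refine ⟨⟨?_, ?_⟩, ?_⟩ <;> intro hc
            · exact hcs (Or.inl (by exact_mod_cast hc))
            · exact hcs (Or.inr (Or.inl (by exact_mod_cast hc)))
            · exact hcs (Or.inr (Or.inr (by exact_mod_cast hc)))
          rw [if_neg (by rw [hX]; simp)]
          rw [ih (pvDSumNat m) hlt f (by omega) hcs]
          conv_rhs => rw [pvM, dif_neg (by omega)]
      · rw [if_neg (by rw [pv_len_toChars m]; omega)]
        rw [pvM, dif_pos (Or.inl (by omega))]

theorem pv_reduceA_false (m : Nat) : pvReduceNumberA (m : Int) false = (pvDrNat m : Int) := by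
  unfold pvReduceNumberA
  simp only [Bool.false_and, Int.toNat_natCast]
  exact pv_loopA_false m (m + 1) (by omega)

theorem pv_reduceA_true (m : Nat) : pvReduceNumberA (m : Int) true = (pvM m : Int) := by
  unfold pvReduceNumberA
  by_cases hm : m = 11 ∨ m = 22 ∨ m = 33
  · rw [if_pos ?_, pv_M_master m hm]
    · rcases hm with h | h | h <;> · rw [h]; decide
  · rw [if_neg ?_]
    · rw [Int.toNat_natCast]
      exact pv_loopA_true m (m + 1) (by omega) hm
    · simp only [Bool.true_and, Bool.or_eq_true, beq_iff_eq]
      intro hc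
      have : (m = 11 ∨ m = 22) ∨ m = 33 := by exact_mod_cast hc
      exact hm (by tauto)

theorem pv_masterLoopB (m : Nat) : ∀ fuel, m < fuel → pvReduceMasterLoop fuel m = pvM m := by
  induction m using Nat.strong_induction_on with
  | _ m ih =>
    intro fuel hf
    cases fuel with
    | zero => omega
    | succ f =>
      rw [pvReduceMasterLoop]
      by_cases h : 9 < m ∧ m ≠ 11 ∧ m ≠ 22 ∧ m ≠ 33
      · rw [if_pos h]
        have hlt := pv_dsum_lt m (by omega)
        rw [ih (pvDSumNat m) hlt f (by omega)]
        conv_rhs => rw [pvM, dif_neg (by omega)]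
      · rw [if_neg h]
        rw [pvM, dif_pos (by omega)]

theorem pv_reduceMaster_natCast (m : Nat) : pvReduceMaster (m : Int) = (pvM m : Int) := by
  unfold pvReduceMaster
  rw [Int.toNat_natCast, pv_masterLoopB m (m + 1) (by omega)]

theorem pv_go_no_dash : ∀ (fuel : Nat) (l cur : List Char) (acc : List (List Char)),
    l.length < fuel → ('-' ∉ cur) → (∀ p ∈ acc, '-' ∉ p) →
    ∀ p ∈ PySem.Chars.splitOn.go ['-'] fuel l cur acc, '-' ∉ p := by
  intro fuel
  induction fuel with
  | zero => intro l cur acc h; omega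
  | succ f ih =>
    intro l cur acc hlen hcur hacc p hp
    cases l with
    | nil =>
      rw [PySem.Chars.splitOn.go.eq_2 ['-'] (f + 1) cur acc (by omega)] at hp
      simp only [List.mem_reverse, List.mem_cons] at hp
      rcases hp with h | h
      · subst h; simpa using hcur
      · exact hacc p h
    | cons c rest =>
      rw [PySem.Chars.splitOn.go.eq_3] at hp
      by_cases hc : c = '-'
      · rw [if_pos (by simp [hc, List.isPrefixOf])] at hp
        simp only [List.length_cons, List.drop_succ_cons] at hp
        refine ih rest [] (cur.reverse :: acc) (by simp at hlen; omega) (by simp) ?_ p hp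
        intro q hq
        rcases List.mem_cons.mp hq with h | h
        · subst h; simpa using hcur
        · exact hacc q h
      · rw [if_neg (by simp [List.isPrefixOf]; intro h; exact absurd h.symm hc)] at hp
        refine ih rest (c :: cur) acc (by simp at hlen ⊢; omega) ?_ hacc p hp
        simp only [List.mem_cons, not_or]
        exact ⟨fun h => hc h.symm, hcur⟩

theorem pv_splitOn_no_dash (s : List Char) : ∀ p ∈ PySem.Chars.splitOn s ['-'], '-' ∉ p := by
  unfold PySem.Chars.splitOn
  exact pv_go_no_dash (s.length + 1) s [] [] (by omega) (by simp) (by simp)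

theorem pv_ofChars?_nonneg (cs : List Char) (h : '-' ∉ cs) (v : Int)
    (hv : PySem.Int.ofChars? cs = some v) : 0 ≤ v := by
  unfold PySem.Int.ofChars? at hv
  simp only [] at hv
  have hsub : ∀ c ∈ (List.dropWhile PySem.Int.isIntSpace
      (List.dropWhile PySem.Int.isIntSpace cs).reverse).reverse, c ∈ cs := by
    intro c hcmem
    rw [List.mem_reverse] at hcmem
    have h1 := (List.dropWhile_sublist (p := PySem.Int.isIntSpace)
      (l := (List.dropWhile PySem.Int.isIntSpace cs).reverse)).mem hcmem
    rw [List.mem_reverse] at h1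
    exact (List.dropWhile_sublist (p := PySem.Int.isIntSpace) (l := cs)).mem h1
  split at hv
  · rename_i ds heq
    exact absurd (hsub '-' (by rw [heq]; simp)) h
  · simp only [Option.map_eq_some_iff, bind, Option.bind_eq_some_iff] at hv
    obtain ⟨a, ⟨b, hb, hpb⟩, rfl⟩ := hv
    simp only [pure, Option.some_inj] at hpb
    subst hpb
    positivity
  · simp only [Option.map_eq_some_iff, bind, Option.bind_eq_some_iff] at hv
    obtain ⟨a, ⟨b, hb, hpb⟩, rfl⟩ := hv
    simp only [pure, Option.some_inj] at hpb
    subst hpb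
    positivity

theorem pv_getD_mem {α : Type} (l : List α) (d : α) (i : Nat) (h : i < l.length) :
    l.getD i d ∈ l := by
  rw [List.getD_eq_getElem l d h]
  exact List.getElem_mem h

theorem pv_msg_int_eq (X : List Char) :
    String.ofList ("Cannot calculate Challenges: ".toList ++ ("Invalid date component: ".toList
        ++ ("invalid literal for int() with base 10: ".toList ++ X)))
    = String.ofList ("Cannot calculate Challenges: Invalid date component: invalid literal for int() with base 10: ".toList ++ X) := by
  refine congrArg String.ofList ?_
  rw [← List.append_assoc, ← List.append_assoc]
  refine congrArg (· ++ X) ?_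
  decide

theorem pv_msg_date_eq :
    String.ofList ("Cannot calculate Challenges: ".toList ++ ("Invalid date component: ".toList ++ "Date must be YYYY-MM-DD".toList))
    = String.ofList ("Cannot calculate Challenges: Invalid date component: ".toList ++ "Date must be YYYY-MM-DD".toList) := by
  refine congrArg String.ofList ?_
  decide

-- ===== VERDICT (by name: the statement is the Claim_ definition above) =====
theorem calculate_challenge_numbers_spec : Claim_equal_calculate_challenge_numbers := by
  intro s _hdom
  unfold Spec_calculate_challenge_numbers
  unfold calculate_challenge_numbers calculate_challenge_numbers_alt pvGetReducedA
  simp only []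
  by_cases h3 : (PySem.Chars.splitOn s.toList ['-']).length = 3
  · rw [if_neg (by omega), if_neg (by omega)]
    have hnod := pv_splitOn_no_dash s.toList
    have hmem : ∀ i : Nat, i < 3 → (PySem.Chars.splitOn s.toList ['-']).getD i [] ∈ PySem.Chars.splitOn s.toList ['-'] :=
      fun i hi => pv_getD_mem _ _ i (by omega)
    cases h0 : PySem.Int.ofChars? ((PySem.Chars.splitOn s.toList ['-']).getD 0 []) with
    | none =>
      exact pv_msg_int_eq _
    | some year =>
      cases h1 : PySem.Int.ofChars? ((PySem.Chars.splitOn s.toList ['-']).getD 1 []) with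
      | none =>
        exact pv_msg_int_eq _
      | some month =>
        cases h2 : PySem.Int.ofChars? ((PySem.Chars.splitOn s.toList ['-']).getD 2 []) with
        | none =>
          exact pv_msg_int_eq _
        | some day =>
          simp only []
          have hy := pv_ofChars?_nonneg _ (hnod _ (hmem 0 (by omega))) year h0
          have hm := pv_ofChars?_nonneg _ (hnod _ (hmem 1 (by omega))) month h1
          have hd := pv_ofChars?_nonneg _ (hnod _ (hmem 2 (by omega))) day h2
          obtain ⟨Y, rfl⟩ : ∃ n : Nat, year = (n : Int) := ⟨year.toNat, (Int.toNat_of_nonneg hy).symm⟩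
          obtain ⟨M, rfl⟩ : ∃ n : Nat, month = (n : Int) := ⟨month.toNat, (Int.toNat_of_nonneg hm).symm⟩
          obtain ⟨D, rfl⟩ : ∃ n : Nat, day = (n : Int) := ⟨day.toNat, (Int.toNat_of_nonneg hd).symm⟩
          simp only [pv_reduceA_true, pv_digitSum_toChars, pv_reduceA_false,
            pv_reduceMaster_natCast, pv_dr_natCast, pvDSum, Int.toNat_natCast,
            Int.abs_eq_natAbs]
  · rw [if_pos h3, if_pos h3]
    exact pv_msg_date_eq
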